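-- pv_equiv track=rewrite | github.com/SDMote/SDR_projects | python_phy/packet_utils.py | generate_access_code_ble
-- ===== SOURCE A (Python) =====
-- def generate_access_code_ble(base_address: int) -> str:
--     """Generates (preamble + base address sequence) to use as access code."""
--     base_address &= 0xFFFFFFFF  # 4-byte unsigned long
--     preamble = 0x55 if base_address & 0x01 else 0xAA
--     preamble = format(preamble, "08b")[::-1]
--
--     base_address = base_address.to_bytes(4, byteorder="little")
--     base_address = [format(byte, "08b")[::-1] for byte in base_address]
--     address_prefix = "00000000"
--
--     return "_".join([preamble] + base_address + [address_prefix])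
-- ===== SOURCE B (Python) =====
-- def generate_access_code_ble(base_address: int) -> str:
--     """Generates (preamble + base address sequence) to use as access code."""
--     a = base_address & 0xFFFFFFFF
--     preamble = format(0x55 if a & 0x01 else 0xAA, "08b")[::-1]
--     bits = format(a, "032b")[::-1]  # whole 32-bit value, LSB-first
--     return "_".join([preamble] + [bits[i:i + 8] for i in range(0, 32, 8)] + ["00000000"])
-- ===== Notes on version B (the rewrite author's own statement) =====
-- stated objective: simpler
-- what changed: B formats the whole masked address as one LSB-first bit string and slices it into four byte-sized chunks, instead of A's to_bytes little-endian byte list with each byte formatted and reversed individually.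
import Mathlib
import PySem

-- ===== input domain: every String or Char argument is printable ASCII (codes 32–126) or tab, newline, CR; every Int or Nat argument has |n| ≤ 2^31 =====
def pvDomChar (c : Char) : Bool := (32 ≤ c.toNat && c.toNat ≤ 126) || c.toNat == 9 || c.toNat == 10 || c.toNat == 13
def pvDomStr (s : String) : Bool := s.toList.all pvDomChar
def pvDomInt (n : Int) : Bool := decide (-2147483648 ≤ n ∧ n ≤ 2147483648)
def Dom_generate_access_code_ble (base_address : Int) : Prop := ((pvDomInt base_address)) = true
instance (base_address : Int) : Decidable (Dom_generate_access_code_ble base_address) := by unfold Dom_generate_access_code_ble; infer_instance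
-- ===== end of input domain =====

-- B builds the whole 32-bit LSB-first bit string at once and slices it into 8-bit chunks,
-- instead of A's to_bytes little-endian byte list with each byte formatted and reversed (objective: simpler).

-- format(n, "0<w>b"): w binary digits, MSB first. Hand port of Python's format; exact whenever
-- 0 ≤ n < 2^w, which holds at every call site here (preamble < 256, masked address < 2^32, bytes < 256).
def pvBitChar (n : Nat) : Char := if n % 2 = 1 then '1' else '0'

def pvFmtBin : Nat → Nat → List Char
  | 0, _ => []
  | w + 1, n => pvFmtBin w (n / 2) ++ [pvBitChar n]

-- ===== PORT A =====
def generate_access_code_ble (base_address : Int) : String :=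
  -- base_address &= 0xFFFFFFFF; the result is nonnegative, so .toNat is exact
  let n : Nat := (PySem.Int.band base_address 4294967295).toNat
  let preamble : Nat := if n &&& 1 ≠ 0 then 0x55 else 0xAA
  let preambleS : List Char := (pvFmtBin 8 preamble).reverse
  -- n.to_bytes(4, byteorder="little"): exact since 0 ≤ n < 2^32
  let bytes : List Nat := [n % 256, n / 256 % 256, n / 65536 % 256, n / 16777216 % 256]
  let byteStrs : List (List Char) := bytes.map (fun b => (pvFmtBin 8 b).reverse)
  PySem.Str.join "_" (([preambleS] ++ byteStrs ++ [String.toList "00000000"]).map String.ofList)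

-- ===== PORT B =====
def generate_access_code_ble_alt (base_address : Int) : String :=
  -- a = base_address & 0xFFFFFFFF; nonnegative, so .toNat is exact
  let n : Nat := (PySem.Int.band base_address 4294967295).toNat
  let preambleS : List Char := (pvFmtBin 8 (if n &&& 1 ≠ 0 then 0x55 else 0xAA)).reverse
  -- bits = format(a, "032b")[::-1]
  let bits : List Char := (pvFmtBin 32 n).reverse
  -- [bits[i:i+8] for i in range(0, 32, 8)]
  let chunks : List (List Char) :=
    (PySem.List.pyRange 0 32 8).map (fun i => PySem.List.slice bits (some i) (some (i + 8)))
  PySem.Str.join "_" (([preambleS] ++ chunks ++ [String.toList "00000000"]).map String.ofList)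

-- ===== PRECONDITION & SPEC =====
def Spec_generate_access_code_ble (base_address : Int) (out : String) : Prop := out = generate_access_code_ble_alt base_address
instance (base_address : Int) (out : String) : Decidable (Spec_generate_access_code_ble base_address out) := by unfold Spec_generate_access_code_ble; infer_instance

-- ===== CLAIM (what is proved, stated in full; the proofs are below) =====
def Claim_equal_generate_access_code_ble : Prop := ∀ (base_address : Int), Dom_generate_access_code_ble base_address → Spec_generate_access_code_ble base_address (generate_access_code_ble base_address)

-- ===== LEMMAS AND PROOFS =====

-- LSB-first bit list of the w low bits of n: the common normal form of both programs' pieces.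
def pvBitsLSB : Nat → Nat → List Char
  | 0, _ => []
  | w + 1, n => pvBitChar n :: pvBitsLSB w (n / 2)

theorem pvFmtBin_reverse (w n : Nat) : (pvFmtBin w n).reverse = pvBitsLSB w n := by
  induction w generalizing n with
  | zero => rfl
  | succ w ih => simp [pvFmtBin, pvBitsLSB, ih]

theorem pvBitsLSB_mod (w n : Nat) : pvBitsLSB w (n % 2 ^ w) = pvBitsLSB w n := by
  induction w generalizing n with
  | zero => rfl
  | succ w ih =>
    have h2 : (2 : Nat) ∣ 2 ^ (w + 1) := dvd_pow_self 2 (Nat.succ_ne_zero w)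
    have hmod : n % 2 ^ (w + 1) % 2 = n % 2 := Nat.mod_mod_of_dvd n h2
    have hdiv : n % 2 ^ (w + 1) / 2 = n / 2 % 2 ^ w := by
      rw [pow_succ', Nat.mod_mul_right_div_self]
    simp [pvBitsLSB, pvBitChar, hmod, hdiv, ih]

theorem pvBitsLSB_drop (k w n : Nat) :
    (pvBitsLSB w n).drop k = pvBitsLSB (w - k) (n / 2 ^ k) := by
  induction k generalizing w n with
  | zero => simp
  | succ k ih =>
    cases w with
    | zero => simp [pvBitsLSB]
    | succ w =>
      have : n / 2 ^ (k + 1) = n / 2 / 2 ^ k := by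
        rw [pow_succ', Nat.div_div_eq_div_mul]
      simp [pvBitsLSB, ih, this]

theorem pvBitsLSB_take (k w n : Nat) :
    (pvBitsLSB w n).take k = pvBitsLSB (min k w) n := by
  induction k generalizing w n with
  | zero => simp [pvBitsLSB]
  | succ k ih =>
    cases w with
    | zero => simp [pvBitsLSB]
    | succ w => simp [pvBitsLSB, ih, Nat.succ_min_succ]

-- bits[a:a+8] of the 32-bit LSB-first string is the LSB-first string of byte a/8.
theorem pvChunk_eq (n a : Nat) (ha : a + 8 ≤ 32) :
    PySem.List.slice ((pvFmtBin 32 n).reverse) (some (a : Int)) (some ((a : Int) + ((8 : Nat) : Int))) =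
      pvBitsLSB 8 (n / 2 ^ a) := by
  rw [pvFmtBin_reverse]
  rw [PySem.List.slice_natCast_add, pvBitsLSB_drop, pvBitsLSB_take]
  have : min 8 (32 - a) = 8 := by omega
  rw [this]

-- ===== VERDICT (by name: the statement is the Claim_ definition above) =====
theorem generate_access_code_ble_spec : Claim_equal_generate_access_code_ble := by
  intro base_address _
  unfold Spec_generate_access_code_ble generate_access_code_ble generate_access_code_ble_alt
  have hrange : PySem.List.pyRange 0 32 8 = [0, 8, 16, 24] := by decide
  rw [hrange]
  simp only [List.map]
  rw [show ((0 : Int) = ((0 : Nat) : Int)) by norm_num,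
      show ((8 : Int) = ((8 : Nat) : Int)) by norm_num,
      show ((16 : Int) = ((16 : Nat) : Int)) by norm_num,
      show ((24 : Int) = ((24 : Nat) : Int)) by norm_num]
  rw [pvChunk_eq _ 0 (by omega), pvChunk_eq _ 8 (by omega),
      pvChunk_eq _ 16 (by omega), pvChunk_eq _ 24 (by omega)]
  simp only [pvFmtBin_reverse, pow_zero, Nat.div_one]
  rw [show (256 : Nat) = 2 ^ 8 by norm_num, show (65536 : Nat) = 2 ^ 16 by norm_num,
      show (16777216 : Nat) = 2 ^ 24 by norm_num]
  rw [pvBitsLSB_mod, pvBitsLSB_mod, pvBitsLSB_mod, pvBitsLSB_mod]
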